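-- pv_equiv track=rewrite | github.com/zeppeki/project-euler-first100 | problems/problem_080.py | get_irrational_square_roots
-- ===== SOURCE A (Python) =====
-- def get_irrational_square_roots(limit: int) -> list[int]:
--     """
--     指定された範囲内の無理数平方根を返す
--     時間計算量: O(√limit)
--     空間計算量: O(limit)
--     """
--     irrational_roots = []
--     perfect_squares = set()
--
--     # 完全平方数を特定
--     i = 1
--     while i * i <= limit:
--         perfect_squares.add(i * i)
--         i += 1
--
--     # 無理数平方根を抽出
--     for n in range(1, limit + 1):
--         if n not in perfect_squares:
--             irrational_roots.append(n)
--
--     return irrational_roots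
-- ===== SOURCE B (Python) =====
-- def get_irrational_square_roots(limit: int) -> list[int]:
--     """Single fused pass: track the next perfect square incrementally instead of
--     precomputing a set of squares and scanning it."""
--     result = []
--     k = 1
--     for n in range(1, limit + 1):
--         if n == k * k:
--             k += 1
--         else:
--             result.append(n)
--     return result
-- ===== Notes on version B (the rewrite author's own statement) =====
-- stated objective: alternative
-- what changed: Replaced A's two-pass build-a-set-of-perfect-squares-then-scan with a single fused loop that tracks the next perfect square k*k incrementally (squares occur in increasing order), maintaining no auxiliary set.
import Mathlib
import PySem

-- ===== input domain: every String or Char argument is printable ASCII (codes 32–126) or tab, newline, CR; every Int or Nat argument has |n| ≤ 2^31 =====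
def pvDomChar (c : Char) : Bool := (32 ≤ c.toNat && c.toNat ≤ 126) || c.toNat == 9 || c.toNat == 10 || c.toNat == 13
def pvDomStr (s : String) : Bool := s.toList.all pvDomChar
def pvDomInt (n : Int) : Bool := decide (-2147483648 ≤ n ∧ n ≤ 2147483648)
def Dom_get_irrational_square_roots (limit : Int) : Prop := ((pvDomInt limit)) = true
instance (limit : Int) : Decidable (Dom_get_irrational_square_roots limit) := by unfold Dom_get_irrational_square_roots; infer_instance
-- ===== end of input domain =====

-- B replaces A's precomputed set of perfect squares + second scan by a single fused loop
-- tracking the next perfect square incrementally (objective: alternative, same cost).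

-- ===== PORT A =====
-- termination helper for the while loop of A (cited in decreasing_by)
theorem pv_le_mul_self (i : Int) : i ≤ i * i := by
  by_cases h : i ≤ 0
  · exact le_trans h (mul_self_nonneg i)
  · nlinarith

-- while i * i <= limit: perfect_squares.add(i*i); i += 1
def pvBuildSquares (limit : Int) (i : Int) (s : PySem.Set Int) : PySem.Set Int :=
  if h : i * i ≤ limit then pvBuildSquares limit (i + 1) (PySem.Set.add s (i * i)) else s
termination_by (limit + 1 - i).toNat
decreasing_by
  have : i ≤ limit := le_trans (pv_le_mul_self i) h
  omega

def get_irrational_square_roots (limit : Int) : List Int :=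
  let perfect_squares := pvBuildSquares limit 1 PySem.Set.empty
  (PySem.List.pyRange 1 (limit + 1) 1).foldl
    (fun acc n => if !(PySem.Set.contains perfect_squares n) then acc ++ [n] else acc) []

-- ===== PORT B =====
def get_irrational_square_roots_alt (limit : Int) : List Int :=
  ((PySem.List.pyRange 1 (limit + 1) 1).foldl
    (fun (st : Int × List Int) n =>
      if n = st.1 * st.1 then (st.1 + 1, st.2) else (st.1, st.2 ++ [n]))
    ((1 : Int), ([] : List Int))).2

-- ===== PRECONDITION & SPEC =====
def Spec_get_irrational_square_roots (limit : Int) (out : List Int) : Prop := out = get_irrational_square_roots_alt limit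
instance (limit : Int) (out : List Int) : Decidable (Spec_get_irrational_square_roots limit out) := by unfold Spec_get_irrational_square_roots; infer_instance

-- ===== CLAIM (what is proved, stated in full; the proofs are below) =====
def Claim_equal_get_irrational_square_roots : Prop := ∀ (limit : Int), Dom_get_irrational_square_roots limit → Spec_get_irrational_square_roots limit (get_irrational_square_roots limit)

-- ===== LEMMAS AND PROOFS =====

-- "n is a (positive) perfect square"
def pvIsSq (n : Int) : Prop := ∃ j : Int, 1 ≤ j ∧ n = j * j

-- canonical boolean square test used as the common filter predicate
def pvSqB (n : Int) : Bool := ((n.toNat.sqrt * n.toNat.sqrt : Nat) : Int) == n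

theorem pv_sq_le_sq {a b : Int} (ha : 0 ≤ a) (hb : 0 ≤ b) (h : a * a ≤ b * b) : a ≤ b := by
  by_contra hc
  push_neg at hc
  nlinarith

theorem pvSqB_iff (n : Int) (h : 1 ≤ n) : (pvSqB n = true ↔ pvIsSq n) := by
  unfold pvSqB pvIsSq
  simp only [beq_iff_eq]
  constructor
  · intro he
    refine ⟨(n.toNat.sqrt : Int), ?_, ?_⟩
    · have h0 : 0 < n.toNat := by omega
      have := Nat.sqrt_pos.mpr h0
      omega
    · push_cast at he ⊢
      omega
  · rintro ⟨j, hj1, rfl⟩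
    have hjn : 0 ≤ j := by omega
    have h1 : ((j.toNat * j.toNat : Nat) : Int) = j * j := by
      push_cast
      rw [Int.toNat_of_nonneg hjn]
    have h2 : (j * j).toNat = j.toNat * j.toNat := by omega
    rw [h2, Nat.sqrt_eq]
    omega

theorem pv_mem_buildSquares (limit : Int) : ∀ (fuel : Nat) (i : Int) (s : PySem.Set Int) (x : Int),
    fuel = (limit + 1 - i).toNat → 1 ≤ i →
    (x ∈ pvBuildSquares limit i s ↔ x ∈ s ∨ ∃ j : Int, i ≤ j ∧ j * j ≤ limit ∧ x = j * j) := by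
  intro fuel
  induction fuel with
  | zero =>
    intro i s x hf hi
    have hig : limit < i := by omega
    have hno : ¬ i * i ≤ limit := by
      intro hle
      have := pv_le_mul_self i
      omega
    rw [pvBuildSquares, dif_neg hno]
    constructor
    · exact Or.inl
    · rintro (h | ⟨j, hj1, hj2, rfl⟩)
      · exact h
      · exfalso
        have := pv_le_mul_self j
        omega
  | succ n ih =>
    intro i s x hf hi
    rw [pvBuildSquares]
    split
    · next hle =>
      have hilim : i ≤ limit := le_trans (pv_le_mul_self i) hle
      rw [ih (i + 1) _ x (by omega) (by omega), PySem.Set.mem_add]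
      constructor
      · rintro ((h | h) | ⟨j, hj1, hj2, rfl⟩)
        · exact Or.inl h
        · exact Or.inr ⟨i, le_refl i, hle, h⟩
        · exact Or.inr ⟨j, by omega, hj2, rfl⟩
      · rintro (h | ⟨j, hj1, hj2, rfl⟩)
        · exact Or.inl (Or.inl h)
        · rcases eq_or_lt_of_le hj1 with heq | hlt
          · exact Or.inl (Or.inr (by rw [← heq]))
          · exact Or.inr ⟨j, by omega, hj2, rfl⟩
    · next hno =>
      constructor
      · exact Or.inl
      · rintro (h | ⟨j, hj1, hj2, rfl⟩)
        · exact h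
        · exfalso
          have hji : i * i ≤ j * j := mul_le_mul hj1 hj1 (by omega) (by omega)
          omega

-- A's membership test agrees with the canonical square test on 1 ≤ n ≤ limit
theorem pv_contains_eq (limit n : Int) (h1 : 1 ≤ n) (h2 : n ≤ limit) :
    PySem.Set.contains (pvBuildSquares limit 1 PySem.Set.empty) n = pvSqB n := by
  have hmem : n ∈ pvBuildSquares limit 1 PySem.Set.empty ↔ pvIsSq n := by
    rw [pv_mem_buildSquares limit (limit + 1 - 1).toNat 1 PySem.Set.empty n rfl (le_refl 1)]
    unfold pvIsSq
    constructor
    · rintro (h | ⟨j, hj1, hj2, rfl⟩)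
      · simp [PySem.Set.empty] at h
      · exact ⟨j, hj1, rfl⟩
    · rintro ⟨j, hj1, rfl⟩
      exact Or.inr ⟨j, hj1, by omega, rfl⟩
  by_cases hq : pvIsSq n
  · rw [(PySem.Set.contains_iff _ n).mpr (hmem.mpr hq), (pvSqB_iff n h1).mpr hq]
  · have ha : PySem.Set.contains (pvBuildSquares limit 1 PySem.Set.empty) n = false := by
      rw [Bool.eq_false_iff]
      intro hc
      exact hq (hmem.mp ((PySem.Set.contains_iff _ n).mp hc))
    have hb : pvSqB n = false := by
      rw [Bool.eq_false_iff]
      intro hc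
      exact hq ((pvSqB_iff n h1).mp hc)
    rw [ha, hb]

-- B's fused loop computes the filter by the canonical square test
theorem pvB_loop (b : Int) : ∀ (fuel : Nat) (a k : Int) (acc : List Int),
    fuel = (b - a).toNat → 1 ≤ k → (k - 1) * (k - 1) < a → a ≤ k * k →
    ((PySem.List.pyRange a b 1).foldl
      (fun (st : Int × List Int) n =>
        if n = st.1 * st.1 then (st.1 + 1, st.2) else (st.1, st.2 ++ [n])) (k, acc)).2
    = acc ++ (PySem.List.pyRange a b 1).filter (fun n => !(pvSqB n)) := by
  intro fuel
  induction fuel with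
  | zero =>
    intro a k acc hf hk h1 h2
    rw [PySem.List.pyRange_one_eq_nil (by omega)]
    simp
  | succ m ih =>
    intro a k acc hf hk h1 h2
    have hab : a < b := by omega
    rw [PySem.List.pyRange_one_cons hab]
    have ha1 : 1 ≤ a := by nlinarith
    by_cases he : a = k * k
    · have hsq : pvSqB a = true := (pvSqB_iff a ha1).mpr ⟨k, hk, he⟩
      simp only [List.foldl_cons, List.filter_cons, hsq, if_pos he, Bool.not_true]
      rw [ih (a + 1) (k + 1) acc (by omega) (by omega)
        (by have hr : (k + 1 - 1) * (k + 1 - 1) = k * k := by ring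
            omega)
        (by nlinarith)]
      simp
    · have hsq : pvSqB a = false := by
        rw [Bool.eq_false_iff]
        intro hc
        rcases (pvSqB_iff a ha1).mp hc with ⟨j, hj1, hj2⟩
        have hjj : j * j ≤ k * k := by rw [← hj2]; exact h2
        have hjk : j ≤ k := pv_sq_le_sq (a := j) (b := k) (by omega) (by omega) hjj
        have hkj : k - 1 < j := by
          by_contra hcc
          push_neg at hcc
          have : j * j ≤ (k - 1) * (k - 1) := mul_le_mul hcc hcc (by omega) (by omega)
          omega
        have hje : j = k := by omega
        rw [hje] at hj2
        exact he hj2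
      simp only [List.foldl_cons, List.filter_cons, hsq, if_neg he, Bool.not_false]
      rw [ih (a + 1) k (acc ++ [a]) (by omega) hk (by omega) (by omega)]
      simp

-- ===== VERDICT (by name: the statement is the Claim_ definition above) =====
theorem get_irrational_square_roots_spec : Claim_equal_get_irrational_square_roots := by
  intro limit _
  unfold Spec_get_irrational_square_roots get_irrational_square_roots get_irrational_square_roots_alt
  rw [PySem.List.foldl_append_if_eq_filter]
  rw [pvB_loop (limit + 1) (limit + 1 - 1).toNat 1 1 [] rfl (le_refl 1) (by omega) (by omega)]
  simp only [List.nil_append]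
  apply List.filter_congr
  intro n hn
  rw [PySem.List.mem_pyRange_one] at hn
  rw [pv_contains_eq limit n hn.1 (by omega)]
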